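-- pv_equiv track=rewrite | github.com/tteon/seocho | seocho/benchmarking.py | split_finance_diagnosis
-- ===== SOURCE A (Python) =====
-- from typing import Any, Dict, Iterable, List, Mapping, Sequence
--
-- _FINANCE_BENCHMARK_INDEXING_FINDINGS = {
--     "indexing_no_graph_writes",
--     "source_text_has_answer_but_graph_projection_lost_it",
-- }
--
-- _FINANCE_BENCHMARK_QUERY_FINDINGS = {
--     "query_no_graph_records",
--     "query_execution_failed_or_contract_error",
--     "vector_substrate_not_in_local_answer_path",
--     "fulltext_substrate_unavailable_or_unchecked",
--     "answer_quality_or_slot_selection_gap",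
-- }
--
-- def split_finance_diagnosis(findings: Sequence[str]) -> Dict[str, List[str]]:
--     """Split finance benchmark diagnosis codes into indexing vs query contracts."""
--
--     contracts = {"indexing": [], "query": [], "shared": []}
--     seen: set[str] = set()
--     for raw in findings:
--         finding = str(raw or "").strip()
--         if not finding or finding in seen:
--             continue
--         seen.add(finding)
--         if finding in _FINANCE_BENCHMARK_INDEXING_FINDINGS:
--             contracts["indexing"].append(finding)
--         elif finding in _FINANCE_BENCHMARK_QUERY_FINDINGS:
--             contracts["query"].append(finding)
--         else:
--             contracts["shared"].append(finding)
--     return contracts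
-- ===== SOURCE B (Python) =====
-- _DIAGNOSIS_BUCKET = {
--     "indexing_no_graph_writes": "indexing",
--     "source_text_has_answer_but_graph_projection_lost_it": "indexing",
--     "query_no_graph_records": "query",
--     "query_execution_failed_or_contract_error": "query",
--     "vector_substrate_not_in_local_answer_path": "query",
--     "fulltext_substrate_unavailable_or_unchecked": "query",
--     "answer_quality_or_slot_selection_gap": "query",
-- }
--
-- def split_finance_diagnosis(findings):
--     """Split finance benchmark diagnosis codes into indexing vs query contracts."""
--     contracts = {"indexing": [], "query": [], "shared": []}
--     pending = [str(raw or "").strip() for raw in findings]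
--     while pending:
--         head = pending[0]
--         pending = [f for f in pending[1:] if f != head]
--         if head:
--             contracts[_DIAGNOSIS_BUCKET.get(head, "shared")].append(head)
--     return contracts
-- ===== Notes on version B (the rewrite author's own statement) =====
-- stated objective: alternative
-- what changed: A's single pass with a growing seen-set and an if/elif membership chain is replaced by a worklist: pop the head of the cleaned pending list, filter every later occurrence of it out of the worklist (so no seen-set exists), and dispatch the head through a precomputed code-to-bucket dictionary; trades the O(n) seen-set pass for O(n^2) worst-case filtering.
import Mathlib
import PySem

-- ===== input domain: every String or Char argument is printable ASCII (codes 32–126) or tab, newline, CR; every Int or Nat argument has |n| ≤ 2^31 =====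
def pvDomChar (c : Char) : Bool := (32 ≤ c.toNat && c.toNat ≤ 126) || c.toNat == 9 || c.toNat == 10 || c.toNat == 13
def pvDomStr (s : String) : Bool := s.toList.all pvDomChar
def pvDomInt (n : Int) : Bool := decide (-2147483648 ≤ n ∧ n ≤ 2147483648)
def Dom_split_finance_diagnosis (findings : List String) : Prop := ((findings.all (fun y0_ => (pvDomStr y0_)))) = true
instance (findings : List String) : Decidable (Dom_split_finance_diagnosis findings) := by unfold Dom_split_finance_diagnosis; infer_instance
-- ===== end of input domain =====

-- B replaces A's seen-set loop by a worklist: pop the head, remove all its later occurrences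
-- from the pending list, and dispatch it through a code→bucket table (objective: alternative).

-- ===== PORT A =====
-- module constant _FINANCE_BENCHMARK_INDEXING_FINDINGS (used for membership only; order irrelevant)
def pvIdxSet : List String :=
  ["indexing_no_graph_writes",
   "source_text_has_answer_but_graph_projection_lost_it"]

-- module constant _FINANCE_BENCHMARK_QUERY_FINDINGS (used for membership only; order irrelevant)
def pvQrySet : List String :=
  ["query_no_graph_records",
   "query_execution_failed_or_contract_error",
   "vector_substrate_not_in_local_answer_path",
   "fulltext_substrate_unavailable_or_unchecked",
   "answer_quality_or_slot_selection_gap"]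

-- str(raw or "").strip() — 'raw or ""' is raw if non-empty else ""; str() on a str is the identity
def pvClean (raw : String) : String :=
  PySem.Str.strip (if raw == "" then "" else raw)

-- A's for-loop, state = (seen, contracts["indexing"], contracts["query"], contracts["shared"])
def pvALoop : List String → PySem.Set String → List String → List String → List String →
    List String × List String × List String
  | [], _, i, q, s => (i, q, s)
  | raw :: rest, seen, i, q, s =>
    let finding := pvClean raw
    if finding == "" || PySem.Set.contains seen finding then
      pvALoop rest seen i q s
    else
      let seen' := PySem.Set.add seen finding
      if finding ∈ pvIdxSet then pvALoop rest seen' (i ++ [finding]) q s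
      else if finding ∈ pvQrySet then pvALoop rest seen' i (q ++ [finding]) s
      else pvALoop rest seen' i q (s ++ [finding])

def split_finance_diagnosis (findings : List String) : List (String × List String) :=
  let r := pvALoop findings PySem.Set.empty [] [] []
  [("indexing", r.1), ("query", r.2.1), ("shared", r.2.2)]

-- ===== PORT B =====
-- B's module constant _DIAGNOSIS_BUCKET (a dict literal with distinct keys)
def pvBucket : PySem.Dict String String :=
  PySem.Dict.ofList
    [("indexing_no_graph_writes", "indexing"),
     ("source_text_has_answer_but_graph_projection_lost_it", "indexing"),
     ("query_no_graph_records", "query"),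
     ("query_execution_failed_or_contract_error", "query"),
     ("vector_substrate_not_in_local_answer_path", "query"),
     ("fulltext_substrate_unavailable_or_unchecked", "query"),
     ("answer_quality_or_slot_selection_gap", "query")]

-- B's while-loop: state = pending worklist and the three contract lists
def pvBLoop : List String → List String × List String × List String →
    List String × List String × List String
  | [], c => c
  | head :: tail, c =>
    let pending := tail.filter (fun f => !(f == head))
    if head == "" then pvBLoop pending c
    else
      let b := PySem.Dict.getD pvBucket head "shared"
      if b == "indexing" then pvBLoop pending (c.1 ++ [head], c.2.1, c.2.2)
      else if b == "query" then pvBLoop pending (c.1, c.2.1 ++ [head], c.2.2)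
      else pvBLoop pending (c.1, c.2.1, c.2.2 ++ [head])
termination_by l => l.length
decreasing_by all_goals
  simp only [List.length_unattach]
  exact Nat.lt_succ_of_le (le_trans (List.length_filter_le _ _) (by simp))

def split_finance_diagnosis_alt (findings : List String) : List (String × List String) :=
  let r := pvBLoop (findings.map pvClean) ([], [], [])
  [("indexing", r.1), ("query", r.2.1), ("shared", r.2.2)]

-- ===== PRECONDITION & SPEC =====
def Spec_split_finance_diagnosis (findings : List String) (out : List (String × List String)) : Prop := out = split_finance_diagnosis_alt findings
instance (findings : List String) (out : List (String × List String)) : Decidable (Spec_split_finance_diagnosis findings out) := by unfold Spec_split_finance_diagnosis; infer_instance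

-- ===== CLAIM (what is proved, stated in full; the proofs are below) =====
def Claim_equal_split_finance_diagnosis : Prop := ∀ (findings : List String), Dom_split_finance_diagnosis findings → Spec_split_finance_diagnosis findings (split_finance_diagnosis findings)

-- ===== LEMMAS AND PROOFS =====

-- the sequence of NEW findings A's loop admits (on the already-cleaned list), given the seen set
def pvNewC : List String → PySem.Set String → List String
  | [], _ => []
  | f :: rest, seen =>
    if f == "" || PySem.Set.contains seen f then pvNewC rest seen
    else f :: pvNewC rest (PySem.Set.add seen f)

-- the sequence B's worklist admits: each head, its later occurrences filtered away
def pvDed : List String → List String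
  | [] => []
  | f :: rest =>
    let r := rest.filter (fun x => !(x == f))
    if f == "" then pvDed r else f :: pvDed r
termination_by l => l.length
decreasing_by all_goals
  simp only [List.length_unattach]
  exact Nat.lt_succ_of_le (le_trans (List.length_filter_le _ _) (by simp))

theorem pvDed_nil : pvDed [] = [] := by rw [pvDed.eq_def]

theorem pvDed_cons (f : String) (rest : List String) :
    pvDed (f :: rest) = if f == "" then pvDed (rest.filter (fun x => !(x == f)))
      else f :: pvDed (rest.filter (fun x => !(x == f))) := by
  rw [pvDed.eq_def]

theorem pvBLoop_nil (c : List String × List String × List String) : pvBLoop [] c = c := by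
  rw [pvBLoop.eq_def]

theorem pvBLoop_cons (head : String) (tail : List String)
    (c : List String × List String × List String) :
    pvBLoop (head :: tail) c =
      (let pending := tail.filter (fun f => !(f == head))
       if head == "" then pvBLoop pending c
       else
         let b := PySem.Dict.getD pvBucket head "shared"
         if b == "indexing" then pvBLoop pending (c.1 ++ [head], c.2.1, c.2.2)
         else if b == "query" then pvBLoop pending (c.1, c.2.1 ++ [head], c.2.2)
         else pvBLoop pending (c.1, c.2.1, c.2.2 ++ [head])) := by
  rw [pvBLoop.eq_def]

theorem pvALoop_eq (l : List String) : ∀ (seen : PySem.Set String) (i q s : List String),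
    pvALoop l seen i q s =
      (i ++ (pvNewC (l.map pvClean) seen).filter (fun f => decide (f ∈ pvIdxSet)),
       q ++ (pvNewC (l.map pvClean) seen).filter (fun f => !decide (f ∈ pvIdxSet) && decide (f ∈ pvQrySet)),
       s ++ (pvNewC (l.map pvClean) seen).filter (fun f => !decide (f ∈ pvIdxSet) && !decide (f ∈ pvQrySet))) := by
  induction l with
  | nil => intro seen i q s; simp [pvALoop, pvNewC]
  | cons raw rest ih =>
    intro seen i q s
    by_cases h0 : pvClean raw = "" ∨ pvClean raw ∈ seen
    · simp [pvALoop, pvNewC, h0, ih]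
    · by_cases h1 : pvClean raw ∈ pvIdxSet
      · simp [pvALoop, pvNewC, h0, h1, ih]
      · by_cases h2 : pvClean raw ∈ pvQrySet
        · simp [pvALoop, pvNewC, h0, h1, h2, ih]
        · simp [pvALoop, pvNewC, h0, h1, h2, ih]

-- B's dict lookup is A's if/elif membership chain
theorem pvGetD_bucket (f : String) :
    PySem.Dict.getD pvBucket f "shared" =
      if f ∈ pvIdxSet then "indexing" else if f ∈ pvQrySet then "query" else "shared" := by
  by_cases h1 : f = "indexing_no_graph_writes"
  · subst h1; decide
  by_cases h2 : f = "source_text_has_answer_but_graph_projection_lost_it"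
  · subst h2; decide
  by_cases h3 : f = "query_no_graph_records"
  · subst h3; decide
  by_cases h4 : f = "query_execution_failed_or_contract_error"
  · subst h4; decide
  by_cases h5 : f = "vector_substrate_not_in_local_answer_path"
  · subst h5; decide
  by_cases h6 : f = "fulltext_substrate_unavailable_or_unchecked"
  · subst h6; decide
  by_cases h7 : f = "answer_quality_or_slot_selection_gap"
  · subst h7; decide
  have hi : f ∉ pvIdxSet := by simp [pvIdxSet, h1, h2]
  have hq : f ∉ pvQrySet := by simp [pvQrySet, h3, h4, h5, h6, h7]
  rw [if_neg hi, if_neg hq]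
  rw [show pvBucket = PySem.Dict.mk
    [("indexing_no_graph_writes", "indexing"),
     ("source_text_has_answer_but_graph_projection_lost_it", "indexing"),
     ("query_no_graph_records", "query"),
     ("query_execution_failed_or_contract_error", "query"),
     ("vector_substrate_not_in_local_answer_path", "query"),
     ("fulltext_substrate_unavailable_or_unchecked", "query"),
     ("answer_quality_or_slot_selection_gap", "query")] from by decide]
  simp [PySem.Dict.getD, PySem.Dict.get?,
    Ne.symm h1, Ne.symm h2, Ne.symm h3, Ne.symm h4, Ne.symm h5, Ne.symm h6, Ne.symm h7]

theorem pvBLoop_eq (n : Nat) : ∀ (l : List String), l.length ≤ n → ∀ (i q s : List String),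
    pvBLoop l (i, q, s) =
      (i ++ (pvDed l).filter (fun f => decide (f ∈ pvIdxSet)),
       q ++ (pvDed l).filter (fun f => !decide (f ∈ pvIdxSet) && decide (f ∈ pvQrySet)),
       s ++ (pvDed l).filter (fun f => !decide (f ∈ pvIdxSet) && !decide (f ∈ pvQrySet))) := by
  induction n with
  | zero =>
    intro l hl i q s
    have : l = [] := List.eq_nil_of_length_eq_zero (Nat.le_zero.mp hl)
    subst this
    simp [pvBLoop_nil, pvDed_nil]
  | succ n ihn =>
    intro l hl i q s
    match l with
    | [] => simp [pvBLoop_nil, pvDed_nil]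
    | f :: rest =>
      have hr : (rest.filter (fun x => !(x == f))).length ≤ n := by
        have := List.length_filter_le (fun x => !(x == f)) rest
        simp at hl
        omega
      rw [pvBLoop_cons, pvDed_cons]
      by_cases h0 : f = ""
      · subst h0; simp [ihn _ hr]
      · by_cases h1 : f ∈ pvIdxSet
        · simp [pvGetD_bucket, h0, h1, ihn _ hr]
        · by_cases h2 : f ∈ pvQrySet
          · simp [pvGetD_bucket, h0, h1, h2, ihn _ hr]
          · simp [pvGetD_bucket, h0, h1, h2, ihn _ hr]

theorem pvContains_add (s : PySem.Set String) (f x : String) :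
    PySem.Set.contains (PySem.Set.add s f) x = (PySem.Set.contains s x || x == f) := by
  simp only [PySem.Set.add, PySem.Set.contains]
  by_cases h : PySem.Set.contains s f = true
  · simp only [PySem.Set.contains] at h
    rw [if_pos (by simpa using h)]
    by_cases hx : x = f
    · subst hx; simp_all
    · simp [hx]
  · simp only [PySem.Set.contains] at h
    rw [if_neg (by simpa using h)]
    by_cases hx : x = f
    · subst hx; simp
    · simp [hx]

theorem pvNewC_congr (cl : List String) : ∀ (s1 s2 : PySem.Set String),
    (∀ x, x ≠ "" → PySem.Set.contains s1 x = PySem.Set.contains s2 x) →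
    pvNewC cl s1 = pvNewC cl s2 := by
  induction cl with
  | nil => intro _ _ _; simp [pvNewC]
  | cons f rest ih =>
    intro s1 s2 h
    by_cases h0 : f = ""
    · simp [pvNewC, h0, ih _ _ h]
    · rw [pvNewC, pvNewC, h f h0]
      by_cases hc : (f == "" || PySem.Set.contains s2 f) = true
      · rw [if_pos hc, if_pos hc]; exact ih _ _ h
      · rw [if_neg hc, if_neg hc]
        refine congrArg _ (ih _ _ ?_)
        intro x hx
        rw [pvContains_add, pvContains_add, h x hx]

-- the key bridge: B's dedup-by-removal of the not-yet-seen part equals A's new-findings sequence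
theorem pvDed_eq_pvNewC (cl : List String) : ∀ (seen : PySem.Set String),
    pvDed (cl.filter (fun x => !(PySem.Set.contains seen x))) = pvNewC cl seen := by
  induction cl with
  | nil => intro seen; simp [pvDed_nil, pvNewC]
  | cons f rest ih =>
    intro seen
    by_cases hc : f ∈ seen
    · rw [List.filter_cons, if_neg (by simp [hc]), ih, pvNewC, if_pos (by simp [hc])]
    · have hfilter : (rest.filter (fun x => !(PySem.Set.contains seen x))).filter
          (fun x => !(x == f)) =
          rest.filter (fun x => !(PySem.Set.contains (PySem.Set.add seen f) x)) := by
        rw [List.filter_filter]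
        refine List.filter_congr ?_
        intro x _
        rw [pvContains_add]
        by_cases hx : x = f
        · subst hx; simp [hc]
        · simp [Bool.and_comm]
      rw [List.filter_cons, if_pos (by simp [hc]), pvDed_cons, hfilter]
      by_cases h0 : f = ""
      · rw [if_pos (by simp [h0]), pvNewC, if_pos (by simp [h0]), ih]
        refine pvNewC_congr rest _ seen ?_
        intro x hx
        rw [pvContains_add]
        have : (x == f) = false := by subst h0; simpa using hx
        simp [this]
      · rw [if_neg (by simp [h0]), pvNewC, if_neg (by simp [h0, hc]), ih]

-- ===== VERDICT (by name: the statement is the Claim_ definition above) =====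
theorem split_finance_diagnosis_spec : Claim_equal_split_finance_diagnosis := by
  intro findings _
  show _ = _
  have hded : pvDed (findings.map pvClean) = pvNewC (findings.map pvClean) PySem.Set.empty := by
    rw [← pvDed_eq_pvNewC]
    refine congrArg _ ?_
    simp [PySem.Set.empty, PySem.Set.contains]
  simp only [split_finance_diagnosis, split_finance_diagnosis_alt, pvALoop_eq,
    pvBLoop_eq (findings.map pvClean).length _ le_rfl, hded]
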